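-- pv_equiv track=rewrite | github.com/vgraeber/adventofcode | 2023/day05/part2.py | condensedata
-- ===== SOURCE A (Python) =====
-- def condensedata(seeddata, seedranges):
--   remranges = []
--   remdata = []
--   seedranges.sort()
--   if ((len(seeddata) != len(seedranges)) and (len(seedranges) > 1)):
--     for i in range(len(seedranges)):
--       for j in range(1, len(seedranges) - i):
--         oldseed = seedranges[i]
--         newseed = seedranges[i + j]
--         if (oldseed == newseed):
--           remranges.append(i + j)
--         elif (oldseed[0] == newseed[0]):
--           remranges.append(i + j)
--           k = str(newseed[0]) + '-' + str(newseed[1] - newseed[0] + 1)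
--           remdata.append(k)
--   newseedranges = []
--   for i in range(len(seedranges)):
--     if i not in remranges:
--       newseedranges.append(seedranges[i])
--   newseeddata = {}
--   for k, v in seeddata.items():
--     if k not in remdata:
--       newseeddata[k] = v
--   return newseeddata, newseedranges
-- ===== SOURCE B (Python) =====
-- def condensedata(seeddata, seedranges):
--   # single linear pass over the sorted ranges instead of A's O(n^2) all-pairs scan;
--   # like A, sorts seedranges in place (return-value equivalence is what is claimed)
--   seedranges.sort()
--   if len(seeddata) == len(seedranges) or len(seedranges) < 2:
--     return dict(seeddata), list(seedranges)
--   kept = []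
--   first = None
--   removed = set()
--   for r in seedranges:
--     if first is not None and r[0] == first[0]:
--       if r[1] != first[1]:
--         removed.add(str(r[0]) + '-' + str(r[1] - r[0] + 1))
--     else:
--       kept.append(r)
--       first = r
--   newdata = {k: v for k, v in seeddata.items() if k not in removed}
--   return newdata, kept
-- ===== Notes on version B (the rewrite author's own statement) =====
-- stated objective: faster
-- what changed: A compares every pair of sorted ranges (nested index loops) to find duplicate starts; B makes one linear pass over the sorted list, keeping the first range of each equal-start group and collecting removed keys into a set.
import Mathlib
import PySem

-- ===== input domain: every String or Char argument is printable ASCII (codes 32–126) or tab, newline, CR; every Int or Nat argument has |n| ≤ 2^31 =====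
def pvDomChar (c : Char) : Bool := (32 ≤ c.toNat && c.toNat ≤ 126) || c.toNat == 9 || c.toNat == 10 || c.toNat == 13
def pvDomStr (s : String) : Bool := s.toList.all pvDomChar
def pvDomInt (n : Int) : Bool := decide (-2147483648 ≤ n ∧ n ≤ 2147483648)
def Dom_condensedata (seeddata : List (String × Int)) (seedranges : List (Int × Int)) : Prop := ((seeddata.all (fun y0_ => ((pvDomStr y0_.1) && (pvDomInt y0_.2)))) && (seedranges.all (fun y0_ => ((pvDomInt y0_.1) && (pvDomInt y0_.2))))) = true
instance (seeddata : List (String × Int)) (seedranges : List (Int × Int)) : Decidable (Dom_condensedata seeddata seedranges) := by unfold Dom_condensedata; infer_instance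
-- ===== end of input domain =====

-- B replaces A's O(n^2) all-pairs scan of the sorted range list by one linear pass;
-- like A, the Python B sorts `seedranges` in place (the claim is about the return value,
-- and B performs the same in-place sort). `seeddata` is a Python dict: both ports
-- materialize it as PySem.Dict.ofList (insertion order, last duplicate value wins), exactly dict().

-- ===== PORT A =====
-- the body of A's inner j-loop; strings are handled as List Char
def remInnerStep (sr : List (Int × Int)) (i : Int) (rem : List Int × List (List Char)) (j : Int) :
    List Int × List (List Char) :=
  let oldseed := PySem.List.pyGetD sr i ((0 : Int), (0 : Int))
  let newseed := PySem.List.pyGetD sr (i + j) ((0 : Int), (0 : Int))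
  if oldseed = newseed then (rem.1 ++ [i + j], rem.2)
  else if oldseed.1 = newseed.1 then
    (rem.1 ++ [i + j],
     rem.2 ++ [PySem.Int.toChars newseed.1 ++ '-' :: PySem.Int.toChars (newseed.2 - newseed.1 + 1)])
  else rem

-- A's nested pair loop building (remranges, remdata)
def remPairs (sr : List (Int × Int)) : List Int × List (List Char) :=
  (PySem.List.pyRange 0 (PySem.List.len sr)).foldl (fun rem i =>
    (PySem.List.pyRange 1 (PySem.List.len sr - i)).foldl (remInnerStep sr i) rem)
    (([] : List Int), ([] : List (List Char)))

def condensedata (seeddata : List (String × Int)) (seedranges : List (Int × Int)) : (List (String × Int)) × (List (Int × Int)) :=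
  let sd := (PySem.Dict.ofList seeddata).items
  let sr := PySem.List.sorted2 seedranges (fun r => r.1) (fun r => r.2)
  let rem :=
    if PySem.List.len sd ≠ PySem.List.len sr ∧ 1 < PySem.List.len sr then remPairs sr
    else ([], [])
  let newseedranges := (PySem.List.pyRange 0 (PySem.List.len sr)).foldl
    (fun acc i => if i ∈ rem.1 then acc else acc ++ [PySem.List.pyGetD sr i ((0 : Int), (0 : Int))]) []
  let newseeddata := sd.foldl
    (fun d kv => if kv.1.toList ∈ rem.2 then d else d.insert kv.1 kv.2) PySem.Dict.empty
  (newseeddata.items, newseedranges)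

-- ===== PORT B =====
-- B's single-pass step: state = (kept ranges, first range of the current start group, removed keys)
def condenseStep (acc : List (Int × Int) × Option (Int × Int) × PySem.Set (List Char)) (r : Int × Int) :
    List (Int × Int) × Option (Int × Int) × PySem.Set (List Char) :=
  match acc.2.1 with
  | some c =>
    if r.1 = c.1 then
      if r.2 ≠ c.2 then
        (acc.1, some c, PySem.Set.add acc.2.2 (PySem.Int.toChars r.1 ++ '-' :: PySem.Int.toChars (r.2 - r.1 + 1)))
      else acc
    else (acc.1 ++ [r], some r, acc.2.2)
  | none => ([r], some r, acc.2.2)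

def condensedata_alt (seeddata : List (String × Int)) (seedranges : List (Int × Int)) : (List (String × Int)) × (List (Int × Int)) :=
  let sd := (PySem.Dict.ofList seeddata).items
  let sr := PySem.List.sorted2 seedranges (fun r => r.1) (fun r => r.2)
  if PySem.List.len sd = PySem.List.len sr ∨ PySem.List.len sr < 2 then (sd, sr)
  else
    let st := sr.foldl condenseStep ([], none, PySem.Set.empty)
    (sd.filter (fun kv => decide (kv.1.toList ∉ st.2.2)), st.1)

-- ===== PRECONDITION & SPEC =====
def Spec_condensedata (seeddata : List (String × Int)) (seedranges : List (Int × Int)) (out : (List (String × Int)) × (List (Int × Int))) : Prop := out = condensedata_alt seeddata seedranges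
instance (seeddata : List (String × Int)) (seedranges : List (Int × Int)) (out : (List (String × Int)) × (List (Int × Int))) : Decidable (Spec_condensedata seeddata seedranges out) := by unfold Spec_condensedata; infer_instance

-- ===== CLAIM (what is proved, stated in full; the proofs are below) =====
def Claim_equal_condensedata : Prop := ∀ (seeddata : List (String × Int)) (seedranges : List (Int × Int)), Dom_condensedata seeddata seedranges → Spec_condensedata seeddata seedranges (condensedata seeddata seedranges)

-- ===== LEMMAS AND PROOFS =====

-- the lexicographic order Python's tuple sort uses
def lexLE (a b : Int × Int) : Prop := a.1 < b.1 ∨ (a.1 = b.1 ∧ a.2 ≤ b.2)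

-- key string (as List Char) recorded for a removed range
def keyOf (r : Int × Int) : List Char :=
  PySem.Int.toChars r.1 ++ '-' :: PySem.Int.toChars (r.2 - r.1 + 1)

-- first range of each equal-start group of a sorted list, given the current group's first range c
def keepGo : (Int × Int) → List (Int × Int) → List (Int × Int)
  | _, [] => []
  | c, r :: t => if r.1 = c.1 then keepGo c t else r :: keepGo r t

-- ranges dropped with a key recorded (same start as the group's first range c, different end)
def rmGo : (Int × Int) → List (Int × Int) → List (Int × Int)
  | _, [] => []
  | c, r :: t => if r.1 = c.1 then (if r.2 ≠ c.2 then r :: rmGo c t else rmGo c t) else rmGo r t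

-- first range of the last group
def leadGo : (Int × Int) → List (Int × Int) → Int × Int
  | c, [] => c
  | c, r :: t => if r.1 = c.1 then leadGo c t else leadGo r t

-- "some earlier element has the same start" (Bool, index form)
def pdB (l : List (Int × Int)) (m : Nat) : Bool :=
  (List.range m).any (fun a => decide ((l.getD a ((0 : Int), (0 : Int))).1 = (l.getD m ((0 : Int), (0 : Int))).1))

-- "some earlier element has the same start and a different end" (Prop, index form)
def QI (l : List (Int × Int)) (m : Nat) : Prop :=
  ∃ a, a < m ∧ (l.getD a ((0 : Int), (0 : Int))).1 = (l.getD m ((0 : Int), (0 : Int))).1 ∧ (l.getD a ((0 : Int), (0 : Int))).2 ≠ (l.getD m ((0 : Int), (0 : Int))).2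

-- index-free forms of A's remranges / remdata
def R1 (sr : List (Int × Int)) : List Int :=
  (PySem.List.pyRange 0 (PySem.List.len sr)).flatMap (fun i =>
    ((PySem.List.pyRange 1 (PySem.List.len sr - i)).filter (fun j =>
      decide ((PySem.List.pyGetD sr i ((0 : Int), (0 : Int))).1 = (PySem.List.pyGetD sr (i + j) ((0 : Int), (0 : Int))).1))).map (fun j => i + j))

def R2 (sr : List (Int × Int)) : List (List Char) :=
  (PySem.List.pyRange 0 (PySem.List.len sr)).flatMap (fun i =>
    ((PySem.List.pyRange 1 (PySem.List.len sr - i)).filter (fun j =>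
      decide ((PySem.List.pyGetD sr i ((0 : Int), (0 : Int))).1 = (PySem.List.pyGetD sr (i + j) ((0 : Int), (0 : Int))).1 ∧
              (PySem.List.pyGetD sr i ((0 : Int), (0 : Int))).2 ≠ (PySem.List.pyGetD sr (i + j) ((0 : Int), (0 : Int))).2))).map (fun j =>
      keyOf (PySem.List.pyGetD sr (i + j) ((0 : Int), (0 : Int)))))

lemma lexLE_trans {a b c : Int × Int} (h1 : lexLE a b) (h2 : lexLE b c) : lexLE a c := by
  unfold lexLE at *
  rcases h1 with h1 | ⟨e1, le1⟩ <;> rcases h2 with h2 | ⟨e2, le2⟩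
  · exact Or.inl (h1.trans h2)
  · exact Or.inl (e2 ▸ h1)
  · exact Or.inl (e1 ▸ h2)
  · exact Or.inr ⟨e1.trans e2, le1.trans le2⟩

def bfun (a b : Int × Int) : Bool :=
  decide (a.1 < b.1) || (!decide (b.1 < a.1) && decide (a.2 < b.2))

lemma bfun_true {a b : Int × Int} (h : bfun a b = true) : lexLE a b := by
  unfold bfun at h; unfold lexLE
  simp only [Bool.or_eq_true, Bool.and_eq_true, Bool.not_eq_true', decide_eq_true_eq,
    decide_eq_false_iff_not] at h
  rcases h with h | ⟨h1, h2⟩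
  · exact Or.inl h
  · rcases lt_or_eq_of_le (le_of_not_gt h1) with h' | h'
    · exact Or.inl h'
    · exact Or.inr ⟨h', le_of_lt h2⟩

lemma bfun_false {a b : Int × Int} (h : bfun a b = false) : lexLE b a := by
  unfold bfun at h; unfold lexLE
  simp only [Bool.or_eq_false_iff, Bool.and_eq_false_iff, Bool.not_eq_false', decide_eq_true_eq,
    decide_eq_false_iff_not] at h
  obtain ⟨h1, h2⟩ := h
  rcases h2 with h2 | h2
  · exact Or.inl h2
  · by_cases hba : b.1 < a.1
    · exact Or.inl hba
    · exact Or.inr ⟨by omega, by omega⟩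

lemma insertBy_lex (x : Int × Int) (ys : List (Int × Int)) (h : ys.Pairwise lexLE) :
    (PySem.List.insertBy bfun x ys).Pairwise lexLE := by
  induction ys with
  | nil => simp [PySem.List.insertBy]
  | cons y t ih =>
    rw [List.pairwise_cons] at h
    by_cases hb : bfun x y = true
    · show ((if bfun x y = true then x :: y :: t else y :: PySem.List.insertBy bfun x t)).Pairwise lexLE
      rw [if_pos hb]
      refine List.Pairwise.cons ?_ (List.Pairwise.cons h.1 h.2)
      intro z hz
      rcases List.mem_cons.mp hz with rfl | hz
      · exact bfun_true hb
      · exact lexLE_trans (bfun_true hb) (h.1 _ hz)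
    · show ((if bfun x y = true then x :: y :: t else y :: PySem.List.insertBy bfun x t)).Pairwise lexLE
      rw [if_neg hb]
      refine List.Pairwise.cons ?_ (ih h.2)
      intro z hz
      rw [PySem.List.mem_insertBy] at hz
      rcases hz with rfl | hz
      · exact bfun_false (by simpa using hb)
      · exact h.1 _ hz

lemma sorted2_lex (xs : List (Int × Int)) :
    (PySem.List.sorted2 xs (fun r => r.1) (fun r => r.2)).Pairwise lexLE := by
  show (xs.foldl (fun acc x => PySem.List.insertBy _ x acc) []).Pairwise lexLE
  have : ∀ (l : List (Int × Int)) (acc : List (Int × Int)), acc.Pairwise lexLE →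
      (l.foldl (fun acc x => PySem.List.insertBy bfun x acc) acc).Pairwise lexLE := by
    intro l
    induction l with
    | nil => intro acc h; exact h
    | cons r t ih => intro acc h; exact ih _ (insertBy_lex r acc h)
  exact this xs [] (by simp)

-- ---- A's pair loop in index-free form ----

-- component forms of the inner-loop body
def f1 (sr : List (Int × Int)) (i : Int) (a : List Int) (j : Int) : List Int :=
  if (PySem.List.pyGetD sr i ((0 : Int), (0 : Int))).1 = (PySem.List.pyGetD sr (i + j) ((0 : Int), (0 : Int))).1 then a ++ [i + j] else a

def f2 (sr : List (Int × Int)) (i : Int) (b : List (List Char)) (j : Int) : List (List Char) :=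
  if (PySem.List.pyGetD sr i ((0 : Int), (0 : Int))).1 = (PySem.List.pyGetD sr (i + j) ((0 : Int), (0 : Int))).1 ∧
     (PySem.List.pyGetD sr i ((0 : Int), (0 : Int))).2 ≠ (PySem.List.pyGetD sr (i + j) ((0 : Int), (0 : Int))).2 then
    b ++ [keyOf (PySem.List.pyGetD sr (i + j) ((0 : Int), (0 : Int)))]
  else b

lemma remInnerStep_eq (sr : List (Int × Int)) (i : Int) :
    remInnerStep sr i = fun rem j => (f1 sr i rem.1 j, f2 sr i rem.2 j) := by
  funext rem j
  show (if PySem.List.pyGetD sr i ((0 : Int), (0 : Int)) = PySem.List.pyGetD sr (i + j) ((0 : Int), (0 : Int)) then _ else _) = _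
  by_cases heq : PySem.List.pyGetD sr i ((0 : Int), (0 : Int)) = PySem.List.pyGetD sr (i + j) ((0 : Int), (0 : Int))
  · rw [if_pos heq]
    have hf : (PySem.List.pyGetD sr i ((0 : Int), (0 : Int))).1 = (PySem.List.pyGetD sr (i + j) ((0 : Int), (0 : Int))).1 := by rw [heq]
    have hs : (PySem.List.pyGetD sr i ((0 : Int), (0 : Int))).2 = (PySem.List.pyGetD sr (i + j) ((0 : Int), (0 : Int))).2 := by rw [heq]
    simp [f1, f2, hf, hs]
  · rw [if_neg heq]
    by_cases hf : (PySem.List.pyGetD sr i ((0 : Int), (0 : Int))).1 = (PySem.List.pyGetD sr (i + j) ((0 : Int), (0 : Int))).1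
    · rw [if_pos hf]
      have hs : (PySem.List.pyGetD sr i ((0 : Int), (0 : Int))).2 ≠ (PySem.List.pyGetD sr (i + j) ((0 : Int), (0 : Int))).2 := by
        intro hs
        exact heq (Prod.ext hf hs)
      simp [f1, f2, hf, hs, keyOf]
    · rw [if_neg hf]
      simp [f1, f2, hf]

lemma remPairs_eq (sr : List (Int × Int)) : remPairs sr = (R1 sr, R2 sr) := by
  unfold remPairs
  have houter : ∀ (rem : List Int × List (List Char)) (i : Int),
      i ∈ PySem.List.pyRange 0 (PySem.List.len sr) →
      (PySem.List.pyRange 1 (PySem.List.len sr - i)).foldl (remInnerStep sr i) rem =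
        ((PySem.List.pyRange 1 (PySem.List.len sr - i)).foldl (f1 sr i) rem.1,
         (PySem.List.pyRange 1 (PySem.List.len sr - i)).foldl (f2 sr i) rem.2) := by
    intro rem i _
    obtain ⟨a, b⟩ := rem
    rw [remInnerStep_eq, PySem.List.foldl_prod_mk]
  rw [PySem.List.foldl_congr_mem
    (f := fun rem i => (PySem.List.pyRange 1 (PySem.List.len sr - i)).foldl (remInnerStep sr i) rem)
    (g := fun rem i =>
      ((PySem.List.pyRange 1 (PySem.List.len sr - i)).foldl (f1 sr i) rem.1,
       (PySem.List.pyRange 1 (PySem.List.len sr - i)).foldl (f2 sr i) rem.2))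
    (init := (([], []))) (l := PySem.List.pyRange 0 (PySem.List.len sr)) houter, PySem.List.foldl_prod_mk
    (f := fun a i => (PySem.List.pyRange 1 (PySem.List.len sr - i)).foldl (f1 sr i) a)
    (g := fun b i => (PySem.List.pyRange 1 (PySem.List.len sr - i)).foldl (f2 sr i) b)]
  refine Prod.ext ?_ ?_
  · show List.foldl _ [] _ = R1 sr
    have hin : ∀ (a : List Int), ∀ i ∈ PySem.List.pyRange 0 (PySem.List.len sr),
        List.foldl (f1 sr i) a (PySem.List.pyRange 1 (PySem.List.len sr - i)) =
          a ++ ((PySem.List.pyRange 1 (PySem.List.len sr - i)).filter (fun j =>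
              decide ((PySem.List.pyGetD sr i ((0 : Int), (0 : Int))).1 =
                (PySem.List.pyGetD sr (i + j) ((0 : Int), (0 : Int))).1))).map (fun j => i + j) := by
      intro a i _
      exact PySem.List.foldl_append_ite
        (fun j => (PySem.List.pyGetD sr i ((0 : Int), (0 : Int))).1 =
          (PySem.List.pyGetD sr (i + j) ((0 : Int), (0 : Int))).1)
        (fun j => i + j) _ _
    rw [PySem.List.foldl_congr_mem
      (f := fun a i => List.foldl (f1 sr i) a (PySem.List.pyRange 1 (PySem.List.len sr - i)))
      (g := fun a i => a ++ ((PySem.List.pyRange 1 (PySem.List.len sr - i)).filter (fun j =>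
          decide ((PySem.List.pyGetD sr i ((0 : Int), (0 : Int))).1 =
            (PySem.List.pyGetD sr (i + j) ((0 : Int), (0 : Int))).1))).map (fun j => i + j))
      (init := ([] : List Int)) (l := PySem.List.pyRange 0 (PySem.List.len sr)) hin,
      PySem.List.foldl_append_eq_flatMap]
    simp [R1]
  · show List.foldl _ [] _ = R2 sr
    have hin : ∀ (b : List (List Char)), ∀ i ∈ PySem.List.pyRange 0 (PySem.List.len sr),
        List.foldl (f2 sr i) b (PySem.List.pyRange 1 (PySem.List.len sr - i)) =
          b ++ ((PySem.List.pyRange 1 (PySem.List.len sr - i)).filter (fun j =>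
              decide ((PySem.List.pyGetD sr i ((0 : Int), (0 : Int))).1 =
                  (PySem.List.pyGetD sr (i + j) ((0 : Int), (0 : Int))).1 ∧
                (PySem.List.pyGetD sr i ((0 : Int), (0 : Int))).2 ≠
                  (PySem.List.pyGetD sr (i + j) ((0 : Int), (0 : Int))).2))).map (fun j =>
            keyOf (PySem.List.pyGetD sr (i + j) ((0 : Int), (0 : Int)))) := by
      intro b i _
      exact PySem.List.foldl_append_ite
        (fun j => (PySem.List.pyGetD sr i ((0 : Int), (0 : Int))).1 =
            (PySem.List.pyGetD sr (i + j) ((0 : Int), (0 : Int))).1 ∧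
          (PySem.List.pyGetD sr i ((0 : Int), (0 : Int))).2 ≠
            (PySem.List.pyGetD sr (i + j) ((0 : Int), (0 : Int))).2)
        (fun j => keyOf (PySem.List.pyGetD sr (i + j) ((0 : Int), (0 : Int)))) _ _
    rw [PySem.List.foldl_congr_mem
      (f := fun b i => List.foldl (f2 sr i) b (PySem.List.pyRange 1 (PySem.List.len sr - i)))
      (g := fun b i => b ++ ((PySem.List.pyRange 1 (PySem.List.len sr - i)).filter (fun j =>
          decide ((PySem.List.pyGetD sr i ((0 : Int), (0 : Int))).1 =
              (PySem.List.pyGetD sr (i + j) ((0 : Int), (0 : Int))).1 ∧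
            (PySem.List.pyGetD sr i ((0 : Int), (0 : Int))).2 ≠
              (PySem.List.pyGetD sr (i + j) ((0 : Int), (0 : Int))).2))).map (fun j =>
          keyOf (PySem.List.pyGetD sr (i + j) ((0 : Int), (0 : Int)))))
      (init := ([] : List (List Char))) (l := PySem.List.pyRange 0 (PySem.List.len sr)) hin,
      PySem.List.foldl_append_eq_flatMap]
    simp [R2]

lemma mem_R1 (sr : List (Int × Int)) (m : Nat) (hm : m < sr.length) :
    ((m : Int) ∈ R1 sr) ↔ pdB sr m = true := by
  simp only [R1, List.mem_flatMap, List.mem_map, List.mem_filter, PySem.List.mem_pyRange_one,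
    PySem.List.len_eq, decide_eq_true_eq, pdB, List.any_eq_true, List.mem_range]
  constructor
  · rintro ⟨i, ⟨h0, hiN⟩, j, ⟨⟨h1, hj⟩, hP⟩, hsum⟩
    refine ⟨i.toNat, by omega, ?_⟩
    rw [show i + j = ((m : Nat) : Int) by omega, PySem.List.pyGetD_natCast] at hP
    rw [show i = ((i.toNat : Nat) : Int) by omega, PySem.List.pyGetD_natCast] at hP
    exact hP
  · rintro ⟨a, ha, hP⟩
    refine ⟨(a : Int), ⟨by omega, by omega⟩, ((m - a : Nat) : Int), ⟨⟨by omega, by omega⟩, ?_⟩, by omega⟩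
    rw [PySem.List.pyGetD_natCast, show (a : Int) + ((m - a : Nat) : Int) = ((m : Nat) : Int) by omega,
      PySem.List.pyGetD_natCast]
    exact hP

lemma mem_R2 (sr : List (Int × Int)) (s : List Char) :
    s ∈ R2 sr ↔ ∃ m, m < sr.length ∧ QI sr m ∧ s = keyOf (sr.getD m ((0 : Int), (0 : Int))) := by
  simp only [R2, List.mem_flatMap, List.mem_map, List.mem_filter, PySem.List.mem_pyRange_one,
    PySem.List.len_eq, decide_eq_true_eq, QI]
  constructor
  · rintro ⟨i, ⟨h0, hiN⟩, j, ⟨⟨h1, hj⟩, hP1, hP2⟩, hkey⟩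
    rw [show i + j = (((i.toNat + j.toNat : Nat)) : Int) by omega, PySem.List.pyGetD_natCast] at hP1 hP2 hkey
    rw [show i = ((i.toNat : Nat) : Int) by omega, PySem.List.pyGetD_natCast] at hP1 hP2
    exact ⟨i.toNat + j.toNat, by omega, ⟨i.toNat, by omega, hP1, hP2⟩, hkey.symm⟩
  · rintro ⟨m, hm, ⟨a, ha, hP1, hP2⟩, hkey⟩
    refine ⟨(a : Int), ⟨by omega, by omega⟩, ((m - a : Nat) : Int), ⟨⟨by omega, by omega⟩, ?_⟩, ?_⟩
    · rw [PySem.List.pyGetD_natCast, show (a : Int) + ((m - a : Nat) : Int) = ((m : Nat) : Int) by omega,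
        PySem.List.pyGetD_natCast]
      exact ⟨hP1, hP2⟩
    · rw [show (a : Int) + ((m - a : Nat) : Int) = ((m : Nat) : Int) by omega,
        PySem.List.pyGetD_natCast]
      exact hkey.symm

-- ---- index form ↔ structural recursion on the sorted list ----

lemma pdB_zero (l : List (Int × Int)) : pdB l 0 = false := by simp [pdB]

lemma pdB_cons_succ (c : Int × Int) (t : List (Int × Int)) (m : Nat) :
    pdB (c :: t) (m + 1) = (decide (c.1 = (t.getD m ((0 : Int), (0 : Int))).1) || pdB t m) := by
  simp only [pdB, List.range_succ_eq_map, List.any_cons, List.any_map, List.getD_cons_zero,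
    List.getD_cons_succ]
  rfl

lemma keepGo_congr_fst (c c' : Int × Int) (h : c.1 = c'.1) (t : List (Int × Int)) :
    keepGo c t = keepGo c' t := by
  induction t with
  | nil => rfl
  | cons r t' ih =>
    simp only [keepGo, h]
    split_ifs <;> simp [ih]

lemma keep_idx (t : List (Int × Int)) : ∀ c : Int × Int, (c :: t).Pairwise lexLE →
    ((List.range t.length).filter (fun m => !(decide (c.1 = (t.getD m ((0 : Int), (0 : Int))).1) || pdB t m))).map
      (fun m => t.getD m ((0 : Int), (0 : Int))) = keepGo c t := by
  induction t with
  | nil => intro c _; simp [keepGo]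
  | cons r t' ih =>
    intro c h
    obtain ⟨hhead, ht⟩ := List.pairwise_cons.mp h
    have hcr : lexLE c r := hhead r (List.mem_cons_self)
    obtain ⟨hrt, _⟩ := List.pairwise_cons.mp ht
    rw [List.length_cons, List.range_succ_eq_map, List.filter_cons]
    simp only [List.getD_cons_zero, pdB_zero, Bool.or_false]
    rw [List.filter_map]
    have hcompmap : ((fun m => (r :: t').getD m ((0 : Int), (0 : Int))) ∘ Nat.succ) =
        (fun m => t'.getD m ((0 : Int), (0 : Int))) := by
      funext m; simp
    by_cases hc : c.1 = r.1
    · rw [if_neg (by simp [hc]), List.map_map]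
      have hpred : ∀ m ∈ List.range t'.length,
          ((fun m => !(decide (c.1 = ((r :: t').getD m ((0 : Int), (0 : Int))).1) || pdB (r :: t') m)) ∘ Nat.succ) m
            = !(decide (r.1 = (t'.getD m ((0 : Int), (0 : Int))).1) || pdB t' m) := by
        intro m _
        simp only [Function.comp, List.getD_cons_succ, pdB_cons_succ, hc]
        cases h1 : decide (r.1 = (t'.getD m ((0 : Int), (0 : Int))).1) <;> simp
      rw [List.filter_congr hpred, hcompmap, ih r ht]
      rw [show keepGo c (r :: t') = keepGo c t' by simp [keepGo, hc.symm]]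
      exact (keepGo_congr_fst c r hc t').symm
    · rw [if_pos (by simp [hc]), List.map_cons, List.map_map]
      simp only [List.getD_cons_zero]
      have hc1 : c.1 < r.1 := by
        rcases hcr with h' | ⟨h', _⟩
        · exact h'
        · exact absurd h' hc
      have hpred : ∀ m ∈ List.range t'.length,
          ((fun m => !(decide (c.1 = ((r :: t').getD m ((0 : Int), (0 : Int))).1) || pdB (r :: t') m)) ∘ Nat.succ) m
            = !(decide (r.1 = (t'.getD m ((0 : Int), (0 : Int))).1) || pdB t' m) := by
        intro m hm
        have hmem : t'.getD m ((0 : Int), (0 : Int)) ∈ t' := by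
          rw [List.getD_eq_getElem _ _ (List.mem_range.mp hm)]
          exact List.getElem_mem _
        have hrm : r.1 ≤ (t'.getD m ((0 : Int), (0 : Int))).1 := by
          rcases hrt _ hmem with h' | ⟨h', _⟩
          · exact le_of_lt h'
          · exact le_of_eq h'
        have : ¬ (c.1 = (t'.getD m ((0 : Int), (0 : Int))).1) := by omega
        simp only [Function.comp, List.getD_cons_succ, pdB_cons_succ, this, decide_false,
          Bool.false_or]
      rw [List.filter_congr hpred, hcompmap, ih r ht]
      have hkg : keepGo c (r :: t') = r :: keepGo r t' := by
        simp only [keepGo]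
        rw [if_neg (fun h' : r.1 = c.1 => hc h'.symm)]
      rw [hkg]

lemma keep_top (c : Int × Int) (t : List (Int × Int)) (h : (c :: t).Pairwise lexLE) :
    ((List.range (c :: t).length).filter (fun m => !pdB (c :: t) m)).map
      (fun m => (c :: t).getD m ((0 : Int), (0 : Int))) = c :: keepGo c t := by
  rw [List.length_cons, List.range_succ_eq_map, List.filter_cons]
  simp only [pdB_zero, Bool.not_false, if_pos]
  rw [List.filter_map, List.map_cons, List.map_map]
  simp only [List.getD_cons_zero]
  have hcompmap : ((fun m => (c :: t).getD m ((0 : Int), (0 : Int))) ∘ Nat.succ) =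
      (fun m => t.getD m ((0 : Int), (0 : Int))) := by
    funext m; simp
  have hpred : ∀ m ∈ List.range t.length,
      ((fun m => !pdB (c :: t) m) ∘ Nat.succ) m
        = !(decide (c.1 = (t.getD m ((0 : Int), (0 : Int))).1) || pdB t m) := by
    intro m _
    simp only [Function.comp, pdB_cons_succ]
  rw [List.filter_congr hpred, hcompmap, keep_idx t c h]

lemma QI_zero (l : List (Int × Int)) : ¬ QI l 0 := by
  rintro ⟨a, ha, _⟩; omega

lemma QI_cons_succ (c : Int × Int) (t : List (Int × Int)) (m : Nat) :
    QI (c :: t) (m + 1) ↔ (c.1 = (t.getD m ((0 : Int), (0 : Int))).1 ∧ c.2 ≠ (t.getD m ((0 : Int), (0 : Int))).2) ∨ QI t m := by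
  constructor
  · rintro ⟨a, ha, h1, h2⟩
    cases a with
    | zero => exact Or.inl ⟨by simpa using h1, by simpa using h2⟩
    | succ a => exact Or.inr ⟨a, by omega, by simpa using h1, by simpa using h2⟩
  · rintro (⟨h1, h2⟩ | ⟨a, ha, h1, h2⟩)
    · exact ⟨0, by omega, by simpa using h1, by simpa using h2⟩
    · exact ⟨a + 1, by omega, by simpa using h1, by simpa using h2⟩

lemma getD_mem' (l : List (Int × Int)) (m : Nat) (hm : m < l.length) :
    l.getD m ((0 : Int), (0 : Int)) ∈ l := by
  rw [List.getD_eq_getElem _ _ hm]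
  exact List.getElem_mem _

lemma rm_idx (t : List (Int × Int)) : ∀ c : Int × Int, (c :: t).Pairwise lexLE → ∀ x,
    (x ∈ rmGo c t ↔ ∃ m, m < t.length ∧ t.getD m ((0 : Int), (0 : Int)) = x ∧
      ((c.1 = (t.getD m ((0 : Int), (0 : Int))).1 ∧ c.2 ≠ (t.getD m ((0 : Int), (0 : Int))).2) ∨ QI t m)) := by
  induction t with
  | nil => intro c _ x; simp [rmGo]
  | cons r t' ih =>
    intro c h x
    obtain ⟨hhead, ht⟩ := List.pairwise_cons.mp h
    have hcr : lexLE c r := hhead r List.mem_cons_self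
    obtain ⟨hrt, _⟩ := List.pairwise_cons.mp ht
    have hct' : (c :: t').Pairwise lexLE := by
      refine List.Pairwise.sublist ?_ h
      exact List.Sublist.cons₂ c (List.sublist_cons_self r t')
    have hry : ∀ m, m < t'.length → lexLE r (t'.getD m ((0 : Int), (0 : Int))) :=
      fun m hm => hrt _ (getD_mem' t' m hm)
    by_cases h1 : r.1 = c.1
    · by_cases h2 : r.2 = c.2
      · have hrc : r = c := Prod.ext h1 h2
        have hgo : rmGo c (r :: t') = rmGo c t' := by simp [rmGo, h1, h2]
        rw [hgo, ih c hct' x]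
        constructor
        · rintro ⟨m, hm, hx, hC⟩
          refine ⟨m + 1, by simpa using Nat.succ_lt_succ hm, by simpa using hx, ?_⟩
          simp only [List.getD_cons_succ]
          rcases hC with hC | hC
          · exact Or.inl hC
          · exact Or.inr ((QI_cons_succ r t' m).mpr (Or.inr hC))
        · rintro ⟨m, hm, hx, hC⟩
          cases m with
          | zero =>
            simp only [List.getD_cons_zero] at hC
            rcases hC with ⟨_, hC2⟩ | hC
            · exact absurd h2.symm hC2
            · exact absurd hC (QI_zero _)
          | succ m =>
            simp only [List.getD_cons_succ] at hx hC
            refine ⟨m, by simpa using hm, hx, ?_⟩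
            rcases hC with hC | hC
            · exact Or.inl hC
            · rcases (QI_cons_succ r t' m).mp hC with ⟨hQ1, hQ2⟩ | hC'
              · exact Or.inl ⟨h1 ▸ hrc ▸ hQ1, hrc ▸ hQ2⟩
              · exact Or.inr hC'
      · have hgo : rmGo c (r :: t') = r :: rmGo c t' := by simp [rmGo, h1, h2]
        rw [hgo]
        have hc2r2 : c.2 ≤ r.2 := by
          rcases hcr with h' | ⟨_, h'⟩
          · omega
          · exact h'
        constructor
        · intro hx
          rcases List.mem_cons.mp hx with rfl | hx'
          · exact ⟨0, by simp, by simp, by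
              simp only [List.getD_cons_zero]
              exact Or.inl ⟨h1.symm, fun he => h2 he.symm⟩⟩
          · obtain ⟨m, hm, hxeq, hC⟩ := (ih c hct' x).mp hx'
            refine ⟨m + 1, by simpa using Nat.succ_lt_succ hm, by simpa using hxeq, ?_⟩
            simp only [List.getD_cons_succ]
            rcases hC with hC | hC
            · exact Or.inl hC
            · exact Or.inr ((QI_cons_succ r t' m).mpr (Or.inr hC))
        · rintro ⟨m, hm, hx, hC⟩
          cases m with
          | zero =>
            simp only [List.getD_cons_zero] at hx
            exact List.mem_cons.mpr (Or.inl hx.symm)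
          | succ m =>
            simp only [List.getD_cons_succ] at hx hC
            have hm' : m < t'.length := by simpa using hm
            refine List.mem_cons.mpr (Or.inr ((ih c hct' x).mpr ⟨m, hm', hx, ?_⟩))
            rcases hC with hC | hC
            · exact Or.inl hC
            · rcases (QI_cons_succ r t' m).mp hC with ⟨hQ1, hQ2⟩ | hC'
              · refine Or.inl ⟨h1 ▸ hQ1, ?_⟩
                have hr2 : r.2 ≤ (t'.getD m ((0 : Int), (0 : Int))).2 := by
                  rcases hry m hm' with h' | ⟨_, h'⟩
                  · omega
                  · exact h'
                intro he
                have : r.2 = c.2 := by omega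
                exact h2 this
              · exact Or.inr hC'
    · have hgo : rmGo c (r :: t') = rmGo r t' := by simp [rmGo, h1]
      rw [hgo, ih r ht x]
      have hc1 : c.1 < r.1 := by
        rcases hcr with h' | ⟨h', _⟩
        · exact h'
        · exact absurd h'.symm h1
      constructor
      · rintro ⟨m, hm, hx, hC⟩
        refine ⟨m + 1, by simpa using Nat.succ_lt_succ hm, by simpa using hx, ?_⟩
        simp only [List.getD_cons_succ]
        exact Or.inr ((QI_cons_succ r t' m).mpr hC)
      · rintro ⟨m, hm, hx, hC⟩
        cases m with
        | zero =>
          simp only [List.getD_cons_zero] at hC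
          rcases hC with ⟨hC1, _⟩ | hC
          · omega
          · exact absurd hC (QI_zero _)
        | succ m =>
          simp only [List.getD_cons_succ] at hx hC
          have hm' : m < t'.length := by simpa using hm
          refine ⟨m, hm', hx, ?_⟩
          rcases hC with ⟨hC1, _⟩ | hC
          · have : r.1 ≤ (t'.getD m ((0 : Int), (0 : Int))).1 := by
              rcases hry m hm' with h' | ⟨h', _⟩
              · omega
              · omega
            omega
          · exact (QI_cons_succ r t' m).mp hC

lemma rm_top (c : Int × Int) (t : List (Int × Int)) (h : (c :: t).Pairwise lexLE) (x : Int × Int) :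
    (x ∈ rmGo c t ↔ ∃ m, m < (c :: t).length ∧ QI (c :: t) m ∧ (c :: t).getD m ((0 : Int), (0 : Int)) = x) := by
  rw [rm_idx t c h x]
  constructor
  · rintro ⟨m, hm, hx, hC⟩
    refine ⟨m + 1, by simpa using Nat.succ_lt_succ hm, (QI_cons_succ c t m).mpr hC, by simpa using hx⟩
  · rintro ⟨m, hm, hC, hx⟩
    cases m with
    | zero => exact absurd hC (QI_zero _)
    | succ m =>
      simp only [List.getD_cons_succ] at hx
      exact ⟨m, by simpa using hm, hx, (QI_cons_succ c t m).mp hC⟩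

-- ---- B's fold ----

lemma foldB_run (t : List (Int × Int)) : ∀ (kept : List (Int × Int)) (c : Int × Int)
    (s : PySem.Set (List Char)),
    t.foldl condenseStep (kept, some c, s) =
      (kept ++ keepGo c t, some (leadGo c t), PySem.Set.update s ((rmGo c t).map keyOf)) := by
  induction t with
  | nil => intro kept c s; simp [keepGo, rmGo, leadGo, PySem.Set.update]
  | cons r t' ih =>
    intro kept c s
    by_cases h1 : r.1 = c.1
    · by_cases h2 : r.2 = c.2
      · simp only [List.foldl_cons, condenseStep, h1, h2, if_pos, ne_eq, not_true_eq_false,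
          if_false]
        rw [ih kept c s]
        simp [keepGo, rmGo, leadGo, h1, h2]
      · simp only [List.foldl_cons, condenseStep]
        rw [if_pos h1, if_pos h2]
        rw [ih kept c _]
        simp [keepGo, rmGo, leadGo, h1, h2, keyOf, PySem.Set.update]
    · simp only [List.foldl_cons, condenseStep]
      rw [if_neg h1]
      rw [ih (kept ++ [r]) r s]
      simp [keepGo, rmGo, leadGo, h1]

-- ---- the dict loop ----

lemma dict_items (sd : List (String × Int)) (hnd : (sd.map Prod.fst).Nodup)
    (p : String × Int → Prop) [DecidablePred p] :
    (sd.foldl (fun d kv => if p kv then d.insert kv.1 kv.2 else d) PySem.Dict.empty).items =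
      sd.filter (fun kv => decide (p kv)) := by
  rw [PySem.List.foldl_ite_eq_foldl_filter]
  have h := PySem.Dict.items_foldl_insert_fresh (sd.filter (fun kv => decide (p kv)))
    (fun a => a.1) (fun a => a.2) (PySem.Dict.empty)
    (by intro a _; simp [PySem.Dict.empty, PySem.Dict.contains])
    (by
      refine List.Nodup.sublist ?_ hnd
      exact List.Sublist.map Prod.fst List.filter_sublist)
  simp only [PySem.Dict.empty] at h ⊢
  rw [h]
  show List.map (fun a => a) _ = _
  simp

-- ===== VERDICT (by name: the statement is the Claim_ definition above) =====
theorem condensedata_spec : Claim_equal_condensedata := by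
  intro seeddata seedranges _
  show condensedata seeddata seedranges = condensedata_alt seeddata seedranges
  simp only [condensedata, condensedata_alt]
  set sd := (PySem.Dict.ofList seeddata).items with hsd
  set sr := PySem.List.sorted2 seedranges (fun r => r.1) (fun r => r.2) with hsr
  have hnd : (sd.map Prod.fst).Nodup := by
    rw [hsd]; exact PySem.Dict.nodup_keys_ofList seeddata
  have hsort : sr.Pairwise lexLE := by rw [hsr]; exact sorted2_lex seedranges
  by_cases hg : PySem.List.len sd = PySem.List.len sr ∨ PySem.List.len sr < 2
  · rw [if_pos hg, if_neg (by
      simp only [PySem.List.len_eq] at hg ⊢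
      omega)]
    refine Prod.ext ?_ ?_
    · show (List.foldl (fun d kv =>
          if kv.1.toList ∈ (([], []) : List Int × List (List Char)).2 then d
          else d.insert kv.1 kv.2) PySem.Dict.empty sd).items = sd
      rw [PySem.List.foldl_congr_mem
        (f := fun d kv => if kv.1.toList ∈ (([], []) : List Int × List (List Char)).2 then d
          else d.insert kv.1 kv.2)
        (g := fun d (kv : String × Int) => d.insert kv.1 kv.2)
        (init := PySem.Dict.empty) (l := sd)
        (by intro d kv _; simp)]
      have h := PySem.Dict.items_foldl_insert_fresh sd (fun a => a.1) (fun a => a.2)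
        PySem.Dict.empty (by intro a _; simp [PySem.Dict.empty, PySem.Dict.contains]) hnd
      simp only [PySem.Dict.empty] at h ⊢
      rw [h]
      show List.map (fun a => a) _ = _
      simp
    · show List.foldl (fun acc i =>
          if i ∈ (([], []) : List Int × List (List Char)).1 then acc
          else acc ++ [PySem.List.pyGetD sr i ((0 : Int), (0 : Int))]) []
          (PySem.List.pyRange 0 (PySem.List.len sr)) = sr
      rw [PySem.List.foldl_congr_mem
        (f := fun acc i => if i ∈ (([], []) : List Int × List (List Char)).1 then acc
          else acc ++ [PySem.List.pyGetD sr i ((0 : Int), (0 : Int))])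
        (g := fun acc i => acc ++ [PySem.List.pyGetD sr i ((0 : Int), (0 : Int))])
        (init := ([] : List (Int × Int))) (l := PySem.List.pyRange 0 (PySem.List.len sr))
        (by intro acc i _; simp)]
      rw [PySem.List.foldl_append_singleton_eq_map, PySem.List.map_pyGetD_pyRange_zero]
      simp
  · rw [if_neg hg, if_pos (by
      simp only [PySem.List.len_eq] at hg ⊢
      omega)]
    have hlen2 : 2 ≤ sr.length := by
      simp only [PySem.List.len_eq] at hg
      omega
    obtain ⟨c, t, hct⟩ : ∃ c t, sr = c :: t := by
      have hne : sr ≠ [] := by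
        intro h0
        rw [h0] at hlen2
        simp at hlen2
      obtain ⟨c, t, hct⟩ := List.exists_cons_of_ne_nil hne
      exact ⟨c, t, hct⟩
    rw [remPairs_eq]
    rw [hct] at hsort ⊢
    rw [List.foldl_cons,
      show condenseStep ([], none, PySem.Set.empty) c = ([c], some c, PySem.Set.empty) from rfl,
      foldB_run t [c] c PySem.Set.empty]
    have hiff : ∀ x : List Char, x ∈ R2 (c :: t) ↔ x ∈ (rmGo c t).map keyOf := by
      intro x
      rw [mem_R2]
      constructor
      · rintro ⟨m, hm, hQ, rfl⟩
        exact List.mem_map.mpr ⟨(c :: t).getD m ((0 : Int), (0 : Int)),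
          (rm_top c t hsort _).mpr ⟨m, hm, hQ, rfl⟩, rfl⟩
      · intro hx
        obtain ⟨y, hy, rfl⟩ := List.mem_map.mp hx
        obtain ⟨m, hm, hQ, hgd⟩ := (rm_top c t hsort _).mp hy
        exact ⟨m, hm, hQ, by rw [hgd]⟩
    refine Prod.ext ?_ ?_
    · show (List.foldl (fun d kv =>
          if kv.1.toList ∈ (R1 (c :: t), R2 (c :: t)).2 then d else d.insert kv.1 kv.2)
          PySem.Dict.empty sd).items = sd.filter _
      rw [PySem.List.foldl_congr_mem
        (f := fun d kv => if kv.1.toList ∈ (R1 (c :: t), R2 (c :: t)).2 then d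
          else d.insert kv.1 kv.2)
        (g := fun d (kv : String × Int) => if kv.1.toList ∉ R2 (c :: t) then d.insert kv.1 kv.2
          else d)
        (init := PySem.Dict.empty) (l := sd)
        (by
          intro d kv _
          by_cases hmem : kv.1.toList ∈ R2 (c :: t) <;> simp [hmem])]
      rw [dict_items sd hnd (fun kv => kv.1.toList ∉ R2 (c :: t))]
      refine List.filter_congr ?_
      intro kv _
      simp only [decide_eq_decide]
      constructor
      · intro hn hmem
        apply hn
        rw [hiff]
        have := (PySem.Set.mem_update PySem.Set.empty ((rmGo c t).map keyOf) kv.1.toList).mp hmem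
        rcases this with h' | h'
        · exact absurd h' (List.not_mem_nil)
        · exact h'
      · intro hn hmem
        apply hn
        exact (PySem.Set.mem_update PySem.Set.empty ((rmGo c t).map keyOf) kv.1.toList).mpr
          (Or.inr ((hiff kv.1.toList).mp hmem))
    · show List.foldl (fun acc i =>
          if i ∈ (R1 (c :: t), R2 (c :: t)).1 then acc
          else acc ++ [PySem.List.pyGetD (c :: t) i ((0 : Int), (0 : Int))]) []
          (PySem.List.pyRange 0 (PySem.List.len (c :: t))) = [c] ++ keepGo c t
      rw [PySem.List.foldl_congr_mem
        (f := fun acc i => if i ∈ (R1 (c :: t), R2 (c :: t)).1 then acc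
          else acc ++ [PySem.List.pyGetD (c :: t) i ((0 : Int), (0 : Int))])
        (g := fun acc i => if i ∉ R1 (c :: t) then
          acc ++ [PySem.List.pyGetD (c :: t) i ((0 : Int), (0 : Int))] else acc)
        (init := ([] : List (Int × Int))) (l := PySem.List.pyRange 0 (PySem.List.len (c :: t)))
        (by
          intro acc i _
          show (if i ∈ R1 (c :: t) then acc else _) = _
          by_cases hmem : i ∈ R1 (c :: t) <;> simp [hmem])]
      rw [PySem.List.foldl_append_ite (fun i => i ∉ R1 (c :: t))
        (fun i => PySem.List.pyGetD (c :: t) i ((0 : Int), (0 : Int)))]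
      rw [PySem.List.len_eq, PySem.List.pyRange_zero_natCast, List.filter_map, List.map_map]
      rw [List.filter_congr (l := List.range (c :: t).length)
        (q := fun m => !pdB (c :: t) m)
        (by
          intro m hm
          have hmN : m < (c :: t).length := List.mem_range.mp hm
          have hR := mem_R1 (c :: t) m hmN
          cases hp : pdB (c :: t) m <;> simp [Function.comp, hR, hp])]
      rw [show ((fun i => PySem.List.pyGetD (c :: t) i ((0 : Int), (0 : Int))) ∘ fun k : Nat => (k : Int)) =
          (fun m => (c :: t).getD m ((0 : Int), (0 : Int))) from by
        funext m
        simp [Function.comp, PySem.List.pyGetD_natCast]]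
      rw [keep_top c t hsort]
      simp
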